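-- pv_equiv track=rewrite | github.com/asyahril-sha/GADIS-AGI | systems/public_sex.py | _check_best_time
-- ===== SOURCE A (Python) =====
-- from typing import Dict, List, Optional, Tuple, Any
--
-- def _check_best_time(current_hour: int, best_times: List[str]) -> bool:
--     """
--     Cek apakah waktu sekarang termasuk waktu terbaik
--
--     Args:
--         current_hour: Jam sekarang
--         best_times: List waktu terbaik
--
--     Returns:
--         True jika waktu terbaik
--     """
--     for time_str in best_times:
--         if time_str == 'malam' and current_hour >= 19:
--             return True
--         elif time_str == 'subuh' and 3 <= current_hour <= 5:
--             return True
--         elif time_str == 'pagi' and 6 <= current_hour <= 10: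
--             return True
--         elif time_str == 'siang' and 11 <= current_hour <= 14:
--             return True
--         elif time_str == 'sore' and 15 <= current_hour <= 18:
--             return True
--         elif time_str == 'tengah malam' and 0 <= current_hour <= 2:
--             return True
--     return False
-- ===== SOURCE B (Python) =====
-- from typing import List
--
-- # Data table of the time categories and their hour ranges (hi=None means unbounded above).
-- _RANGES = (
--     ('malam', 19, None),
--     ('subuh', 3, 5),
--     ('pagi', 6, 10),
--     ('siang', 11, 14),
--     ('sore', 15, 18),
--     ('tengah malam', 0, 2),
-- )
--
-- def _check_best_time(current_hour: int, best_times: List[str]) -> bool: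
--     wanted = set(best_times)
--     return any(
--         name in wanted and lo <= current_hour and (hi is None or current_hour <= hi)
--         for name, lo, hi in _RANGES
--     )
-- ===== Notes on version B (the rewrite author's own statement) =====
-- stated objective: alternative
-- what changed: B inverts the traversal: instead of scanning best_times and range-testing each element with a hard-coded if/elif chain, it builds a set of best_times once and iterates over a constant data table of (category, lo, hi) ranges, returning whether any in-range category is in the set.
import Mathlib
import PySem

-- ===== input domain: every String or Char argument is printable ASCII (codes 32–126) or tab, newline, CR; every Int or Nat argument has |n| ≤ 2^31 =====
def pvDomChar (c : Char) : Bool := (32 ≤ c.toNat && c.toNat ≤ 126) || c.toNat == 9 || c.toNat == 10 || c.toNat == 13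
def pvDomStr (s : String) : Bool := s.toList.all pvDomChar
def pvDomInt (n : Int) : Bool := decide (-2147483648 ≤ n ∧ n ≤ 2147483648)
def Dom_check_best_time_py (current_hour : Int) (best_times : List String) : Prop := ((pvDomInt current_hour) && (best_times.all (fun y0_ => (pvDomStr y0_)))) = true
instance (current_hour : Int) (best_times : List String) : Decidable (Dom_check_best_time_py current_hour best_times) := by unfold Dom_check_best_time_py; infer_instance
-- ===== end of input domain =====

-- B inverts the traversal: it builds a set of best_times once and scans a constant table of
-- (category, lo, hi) ranges, instead of A's scan of best_times with a hard-coded if/elif chain (alternative decomposition).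

-- ===== PORT A =====
def check_best_time_py (current_hour : Int) (best_times : List String) : Bool :=
  match best_times with
  | [] => false
  | t :: rest =>
    if t = "malam" ∧ 19 ≤ current_hour then true
    else if t = "subuh" ∧ 3 ≤ current_hour ∧ current_hour ≤ 5 then true
    else if t = "pagi" ∧ 6 ≤ current_hour ∧ current_hour ≤ 10 then true
    else if t = "siang" ∧ 11 ≤ current_hour ∧ current_hour ≤ 14 then true
    else if t = "sore" ∧ 15 ≤ current_hour ∧ current_hour ≤ 18 then true
    else if t = "tengah malam" ∧ 0 ≤ current_hour ∧ current_hour ≤ 2 then true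
    else check_best_time_py current_hour rest

-- ===== PORT B =====
-- the constant table _RANGES (hi = none means unbounded above, Python's None)
def pvRanges : List (String × Int × Option Int) :=
  [("malam", 19, none), ("subuh", 3, some 5), ("pagi", 6, some 10),
   ("siang", 11, some 14), ("sore", 15, some 18), ("tengah malam", 0, some 2)]

def check_best_time_py_alt (current_hour : Int) (best_times : List String) : Bool :=
  let wanted : PySem.Set String := PySem.Set.ofList best_times
  pvRanges.any (fun e =>
    PySem.Set.contains wanted e.1 && decide (e.2.1 ≤ current_hour) &&
      (match e.2.2 with | none => true | some hi => decide (current_hour ≤ hi)))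

-- ===== PRECONDITION & SPEC =====
def Spec_check_best_time_py (current_hour : Int) (best_times : List String) (out : Bool) : Prop := out = check_best_time_py_alt current_hour best_times
instance (current_hour : Int) (best_times : List String) (out : Bool) : Decidable (Spec_check_best_time_py current_hour best_times out) := by unfold Spec_check_best_time_py; infer_instance

-- ===== CLAIM =====
def Claim_equal_check_best_time_py : Prop := ∀ (current_hour : Int) (best_times : List String), Dom_check_best_time_py current_hour best_times → Spec_check_best_time_py current_hour best_times (check_best_time_py current_hour best_times)

-- ===== LEMMAS AND PROOFS =====
set_option maxHeartbeats 1000000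

-- if the head element does not hit, it can be dropped from the membership disjunct
theorem drop_head_case (p q r : Prop) (hn : ¬(p ∧ r)) : ((p ∨ q) ∧ r) ↔ (q ∧ r) := by tauto

-- each element of t :: rest is t or an element of rest
theorem pv_mem_cons_of_eq {α : Type} {t a : α} {rest : List α} (h : a = t) : a ∈ t :: rest := by
  simp [h]


-- B, characterised as a six-way disjunction over membership-and-range conditions
theorem alt_char (h : Int) (bts : List String) :
    check_best_time_py_alt h bts = true ↔
      ("malam" ∈ bts ∧ 19 ≤ h) ∨ ("subuh" ∈ bts ∧ 3 ≤ h ∧ h ≤ 5) ∨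
      ("pagi" ∈ bts ∧ 6 ≤ h ∧ h ≤ 10) ∨ ("siang" ∈ bts ∧ 11 ≤ h ∧ h ≤ 14) ∨
      ("sore" ∈ bts ∧ 15 ≤ h ∧ h ≤ 18) ∨ ("tengah malam" ∈ bts ∧ 0 ≤ h ∧ h ≤ 2) := by
  simp [check_best_time_py_alt, pvRanges, PySem.Set.mem_ofList,
    and_assoc]

-- A, characterised the same way, by induction on the scanned list
theorem a_char (h : Int) (bts : List String) :
    check_best_time_py h bts = true ↔
      ("malam" ∈ bts ∧ 19 ≤ h) ∨ ("subuh" ∈ bts ∧ 3 ≤ h ∧ h ≤ 5) ∨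
      ("pagi" ∈ bts ∧ 6 ≤ h ∧ h ≤ 10) ∨ ("siang" ∈ bts ∧ 11 ≤ h ∧ h ≤ 14) ∨
      ("sore" ∈ bts ∧ 15 ≤ h ∧ h ≤ 18) ∨ ("tengah malam" ∈ bts ∧ 0 ≤ h ∧ h ≤ 2) := by
  induction bts with
  | nil => simp [check_best_time_py]
  | cons t rest ih =>
    rw [check_best_time_py]
    split_ifs with h1 h2 h3 h4 h5 h6
    · exact iff_of_true rfl (Or.inl ⟨pv_mem_cons_of_eq h1.1.symm, h1.2⟩)
    · exact iff_of_true rfl (Or.inr (Or.inl ⟨pv_mem_cons_of_eq h2.1.symm, h2.2⟩))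
    · exact iff_of_true rfl (Or.inr (Or.inr (Or.inl ⟨pv_mem_cons_of_eq h3.1.symm, h3.2⟩)))
    · exact iff_of_true rfl (Or.inr (Or.inr (Or.inr (Or.inl ⟨pv_mem_cons_of_eq h4.1.symm, h4.2⟩))))
    · exact iff_of_true rfl (Or.inr (Or.inr (Or.inr (Or.inr (Or.inl ⟨pv_mem_cons_of_eq h5.1.symm, h5.2⟩)))))
    · exact iff_of_true rfl (Or.inr (Or.inr (Or.inr (Or.inr (Or.inr ⟨pv_mem_cons_of_eq h6.1.symm, h6.2⟩)))))
    · rw [ih]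
      simp only [List.mem_cons]
      rw [drop_head_case _ _ _ (fun c => h1 ⟨c.1.symm, c.2⟩),
          drop_head_case _ _ _ (fun c => h2 ⟨c.1.symm, c.2⟩),
          drop_head_case _ _ _ (fun c => h3 ⟨c.1.symm, c.2⟩),
          drop_head_case _ _ _ (fun c => h4 ⟨c.1.symm, c.2⟩),
          drop_head_case _ _ _ (fun c => h5 ⟨c.1.symm, c.2⟩),
          drop_head_case _ _ _ (fun c => h6 ⟨c.1.symm, c.2⟩)]

-- ===== VERDICT =====
theorem check_best_time_py_spec : Claim_equal_check_best_time_py := by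
  intro h bts _
  unfold Spec_check_best_time_py
  rw [Bool.eq_iff_iff, a_char, alt_char]
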